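-- pv_equiv track=rewrite | github.com/chickitza/midiTex | main.py | fit_in_range
-- ===== SOURCE A (Python) =====
-- def fit_in_range(num, start, end):
--     # Check if the number is within the range and fit it by mod
--     if num < start or num > end:
--         # If not, add or subtract 12 until it is
--         while num < start or num > end:
--             if num < start:
--                 num += 12
--             elif num > end:
--                 num -= 12
--
--     return num
-- ===== SOURCE B (Python) =====
-- def fit_in_range(num, start, end):
--     # Closed form: the smallest value >= start (resp. largest <= end)
--     # congruent to num mod 12, by modular arithmetic instead of a loop.
--     if num < start:
--         return start + (num - start) % 12
--     if num > end:
--         return end - (end - num) % 12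
--     return num
-- ===== Notes on version B (the rewrite author's own statement) =====
-- stated objective: simpler
-- what changed: Replaced the step-by-12 while loop with a direct modular closed form (start + (num-start)%12 when below the range, end - (end-num)%12 when above); Pre_ excludes exactly the inputs on which A's loop never terminates (no value congruent to num mod 12 lies in [start,end]).
import Mathlib
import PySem

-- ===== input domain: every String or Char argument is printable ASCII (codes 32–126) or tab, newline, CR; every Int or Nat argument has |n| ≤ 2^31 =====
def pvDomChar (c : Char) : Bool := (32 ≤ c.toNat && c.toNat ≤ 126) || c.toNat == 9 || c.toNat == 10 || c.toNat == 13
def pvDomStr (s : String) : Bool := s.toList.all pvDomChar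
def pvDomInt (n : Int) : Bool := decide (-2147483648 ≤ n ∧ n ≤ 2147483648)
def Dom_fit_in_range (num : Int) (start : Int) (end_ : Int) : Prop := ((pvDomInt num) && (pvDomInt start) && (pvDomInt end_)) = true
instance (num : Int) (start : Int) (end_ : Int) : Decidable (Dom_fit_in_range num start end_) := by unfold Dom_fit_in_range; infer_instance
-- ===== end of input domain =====

-- B replaces A's step-by-12 while loop with a direct modular closed form; Pre_ excludes
-- the inputs on which A's loop never terminates.


-- ===== PORT A =====
-- the while loop, with fuel; each iteration adds or subtracts 12 exactly as A does
def fitLoop (fuel : Nat) (num start end_ : Int) : Int :=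
  match fuel with
  | 0 => num
  | Nat.succ f =>
    if num < start ∨ num > end_ then
      if num < start then fitLoop f (num + 12) start end_
      else fitLoop f (num - 12) start end_
    else num

def fit_in_range (num : Int) (start : Int) (end_ : Int) : Int :=
  if num < start ∨ num > end_ then
    fitLoop ((start - num).natAbs + (num - end_).natAbs + 1) num start end_
  else num

-- ===== PORT B =====
def fit_in_range_alt (num : Int) (start : Int) (end_ : Int) : Int :=
  if num < start then start + PySem.Int.mod (num - start) 12
  else if num > end_ then end_ - PySem.Int.mod (end_ - num) 12
  else num

-- ===== PRECONDITION & SPEC =====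
-- Pre_ excludes exactly the inputs on which A's while loop never terminates:
-- those where no integer congruent to num modulo 12 lies inside [start, end_].
def Pre_fit_in_range (num : Int) (start : Int) (end_ : Int) : Prop :=
  start + (num - start) % 12 ≤ end_
instance (num : Int) (start : Int) (end_ : Int) : Decidable (Pre_fit_in_range num start end_) := by unfold Pre_fit_in_range; infer_instance

def pvWitness_fit_in_range : Int × Int × Int := (30, 0, 11)

def Spec_fit_in_range (num : Int) (start : Int) (end_ : Int) (out : Int) : Prop := out = fit_in_range_alt num start end_
instance (num : Int) (start : Int) (end_ : Int) (out : Int) : Decidable (Spec_fit_in_range num start end_ out) := by unfold Spec_fit_in_range; infer_instance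

-- ===== CLAIM (what is proved, stated in full; the proofs are below) =====
def Claim_equal_fit_in_range : Prop := ∀ (num : Int) (start : Int) (end_ : Int), Dom_fit_in_range num start end_ → Pre_fit_in_range num start end_ → Spec_fit_in_range num start end_ (fit_in_range num start end_)

-- ===== LEMMAS AND PROOFS =====

-- ascending phase: num below start, some residue fits; the loop lands on start + (num-start)%12
lemma fitLoop_up (fuel : Nat) : ∀ (num start end_ : Int),
    num < start → start + (num - start) % 12 ≤ end_ → start - num ≤ 12 * fuel →
    fitLoop fuel num start end_ = start + (num - start) % 12 := by
  induction fuel with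
  | zero => intro num start end_ h1 _ h3; omega
  | succ f ih =>
    intro num start end_ h1 h2 h3
    simp only [fitLoop]
    rw [if_pos (Or.inl h1), if_pos h1]
    by_cases hlt : num + 12 < start
    · rw [ih (num + 12) start end_ hlt (by omega) (by omega)]
      omega
    · -- num + 12 has entered [start, end_]: it equals the closed form and the loop stops
      have hform : start + (num - start) % 12 = num + 12 := by omega
      have hle : num + 12 ≤ end_ := by omega
      cases f with
      | zero => simp [fitLoop]; omega
      | succ g =>
        simp only [fitLoop]
        rw [if_neg (by omega)]
        omega

-- descending phase: num above end_, some residue fits; the loop lands on end_ - (end_-num)%12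
lemma fitLoop_down (fuel : Nat) : ∀ (num start end_ : Int),
    num > end_ → start ≤ end_ - (end_ - num) % 12 → num - end_ ≤ 12 * fuel →
    fitLoop fuel num start end_ = end_ - (end_ - num) % 12 := by
  induction fuel with
  | zero => intro num start end_ h1 _ h3; omega
  | succ f ih =>
    intro num start end_ h1 h2 h3
    simp only [fitLoop]
    rw [if_pos (Or.inr h1), if_neg (by omega)]
    by_cases hgt : num - 12 > end_
    · rw [ih (num - 12) start end_ hgt (by omega) (by omega)]
      omega
    · have hform : end_ - (end_ - num) % 12 = num - 12 := by omega
      have hge : start ≤ num - 12 := by omega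
      cases f with
      | zero => simp [fitLoop]; omega
      | succ g =>
        simp only [fitLoop]
        rw [if_neg (by omega)]
        omega

-- ===== VERDICT (by name: the statement is the Claim_ definition above) =====
theorem fit_in_range_spec : Claim_equal_fit_in_range := by
  intro num start end_ _ hpre
  unfold Spec_fit_in_range fit_in_range fit_in_range_alt Pre_fit_in_range at *
  rw [PySem.Int.mod_eq_emod_of_pos (by norm_num : (0:Int) < 12), PySem.Int.mod_eq_emod_of_pos (by norm_num : (0:Int) < 12)]
  by_cases h1 : num < start
  · rw [if_pos (Or.inl h1), if_pos h1]
    rw [fitLoop_up _ num start end_ h1 hpre (by omega)]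
  · rw [if_neg h1]
    by_cases h2 : num > end_
    · rw [if_pos (Or.inr h2), if_pos h2]
      have hdown : start ≤ end_ - (end_ - num) % 12 := by omega
      rw [fitLoop_down _ num start end_ h2 hdown (by omega)]
    · rw [if_neg (by omega), if_neg h2]
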